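-- pv_equiv track=rewrite | github.com/oksent-dev/Leetcode | solutions/3666. Minimum Operations to Equalize Binary String/minOperations.py | minOperations
-- ===== SOURCE A (Python) =====
-- import collections
--
-- def minOperations(s: str, k: int) -> int:
--     n = len(s)
--     z_count = s.count('0')
--     if z_count == 0:
--         return 0
--
--     # DSU to skip visited nodes for even and odd indices
--     # We need nodes up to n + 2 to avoid index out of bounds
--     p = [list(range(0, n + 3)), list(range(0, n + 3))]
--
--     def find(par, i):
--         root = i
--         par_p = p[par]
--         while par_p[root] != root:
--             root = par_p[root]
--         curr = i
--         while par_p[curr] != root: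
--             next_i = par_p[curr]
--             par_p[curr] = root
--             curr = next_i
--         return root
--
--     q = collections.deque([z_count])
--     dist = [-1] * (n + 1)
--     dist[z_count] = 0
--
--     # Mark the initial z_count as visited in DSU
--     par_init = z_count % 2
--     p[par_init][z_count] = find(par_init, z_count + 2)
--
--     while q:
--         z = q.popleft()
--         d = dist[z]
--
--         l = abs(z - k)
--         r = min(z + k, 2 * n - z - k)
--         par = (z + k) % 2
--
--         curr = find(par, l)
--         while curr <= r:
--             if dist[curr] == -1:
--                 dist[curr] = d + 1
--                 if curr == 0:
--                     return d + 1
--                 q.append(curr)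
--
--             # Mark as visited (remove from future find calls)
--             p[par][curr] = find(par, curr + 2)
--             curr = find(par, curr)
--
--     return -1
-- ===== SOURCE B (Python) =====
-- import collections
--
-- def minOperations(s: str, k: int) -> int:
--     # Same BFS over the number of zeros, but without the DSU: a dict of
--     # distances doubles as the visited set, and each level is scanned
--     # directly in steps of 2 (abs(z-k) already has parity (z+k) % 2).
--     n = len(s)
--     z = s.count('0')
--     if z == 0:
--         return 0
--     dist = {z: 0}
--     q = collections.deque([z])
--     while q:
--         z0 = q.popleft()
--         d = dist[z0]
--         curr = abs(z0 - k)
--         r = min(z0 + k, 2 * n - z0 - k)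
--         while curr <= r:
--             if curr not in dist:
--                 dist[curr] = d + 1
--                 if curr == 0:
--                     return d + 1
--                 q.append(curr)
--             curr += 2
--     return -1
-- ===== Notes on version B (the rewrite author's own statement) =====
-- stated objective: simpler
-- what changed: Dropped A's union-find (path-compressed DSU over even/odd index arrays) entirely: B runs the same BFS over the zero-count but scans each reachable interval [|z-k|, r] directly in steps of 2, using the distance dict itself as the visited set.
-- crash fix: When s contains a zero and k lies outside [0, len(s)] with |z_count - k| > len(s) + 2, A raises IndexError on its fixed-size DSU arrays; B's dict-based BFS returns -1 there. — e.g. on minOperations("0", 10): A raises IndexError, B returns -1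
import Mathlib
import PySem

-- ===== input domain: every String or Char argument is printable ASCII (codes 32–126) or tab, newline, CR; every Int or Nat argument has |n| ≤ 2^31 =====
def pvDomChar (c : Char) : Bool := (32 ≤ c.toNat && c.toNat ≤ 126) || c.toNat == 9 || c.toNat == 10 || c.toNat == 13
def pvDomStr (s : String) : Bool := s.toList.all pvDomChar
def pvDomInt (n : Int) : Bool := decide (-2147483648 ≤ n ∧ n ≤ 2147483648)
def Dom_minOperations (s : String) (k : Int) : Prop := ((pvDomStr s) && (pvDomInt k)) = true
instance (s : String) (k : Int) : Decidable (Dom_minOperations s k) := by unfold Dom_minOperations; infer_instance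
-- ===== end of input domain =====

-- B drops A's union-find machinery and scans each BFS interval directly in steps of 2,
-- using the distance dict as the visited set; equal return value on all of Pre_ (no mutation involved).

-- ===== PORT A =====
-- 'while par_p[root] != root: root = par_p[root]'  (fueled; fuel = n+3 always suffices inside Pre_,
--  and indices are in range inside Pre_, so pyGetD's default is never the value read)
def findRoot (a : List Int) : Nat → Int → Int
  | 0, root => root
  | fuel+1, root =>
    if PySem.List.pyGetD a root 0 ≠ root then findRoot a fuel (PySem.List.pyGetD a root 0) else root

-- 'while par_p[curr] != root: next_i = par_p[curr]; par_p[curr] = root; curr = next_i'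
def compress (a : List Int) (root : Int) : Nat → Int → List Int
  | 0, _ => a
  | fuel+1, curr =>
    if PySem.List.pyGetD a curr 0 ≠ root then
      compress (PySem.List.pySetD a curr root) root fuel (PySem.List.pyGetD a curr 0)
    else a

-- 'def find(par, i)' acting on one of the two parent arrays
def dsuFind (a : List Int) (i : Int) (fuel : Nat) : Int × List Int :=
  let root := findRoot a fuel i
  (root, compress a root fuel i)

-- inner 'while curr <= r' loop of A; returns (parent array, dist, queue, early-return value)
def aScan (N : Nat) (r d : Int) (a dist q : List Int) (curr : Int) :
    Nat → List Int × List Int × List Int × Option Int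
  | 0 => (a, dist, q, none)
  | fuel+1 =>
    if curr ≤ r then
      if PySem.List.pyGetD dist curr (-1) = -1 then
        let dist' := PySem.List.pySetD dist curr (d+1)
        if curr = 0 then (a, dist', q, some (d+1))
        else
          let q' := q ++ [curr]
          let t := dsuFind a (curr+2) N
          let a2 := PySem.List.pySetD t.2 curr t.1
          let c := dsuFind a2 curr N
          aScan N r d c.2 dist' q' c.1 fuel
      else
        let t := dsuFind a (curr+2) N
        let a2 := PySem.List.pySetD t.2 curr t.1
        let c := dsuFind a2 curr N
        aScan N r d c.2 dist q c.1 fuel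
    else (a, dist, q, none)

-- outer 'while q' loop of A (fueled; n+2 pops always suffice: each value is enqueued at most once)
def aLoop (n k : Int) (N : Nat) (p0 p1 dist : List Int) (q : List Int) : Nat → Int
  | 0 => -1
  | fuel+1 =>
    match q with
    | [] => -1
    | z :: q' =>
      let d := PySem.List.pyGetD dist z (-1)
      let l := |z - k|
      let r := min (z + k) (2 * n - z - k)
      let par := PySem.Int.mod (z + k) 2
      let a := if par = 0 then p0 else p1
      let f := dsuFind a l N
      match aScan N r d f.2 dist q' f.1 N with
      | (a', dist', q'', some v) => v
      | (a', dist', q'', none) =>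
        aLoop n k N (if par = 0 then a' else p0) (if par = 0 then p1 else a') dist' q'' fuel

def minOperations (s : String) (k : Int) : Int :=
  let n : Int := PySem.Str.len s
  let z : Int := (PySem.Str.count s "0" : Int)
  if z = 0 then 0
  else
    let N : Nat := (n+3).toNat
    let p0 := PySem.List.pyRange 0 (n+3) 1
    let p1 := PySem.List.pyRange 0 (n+3) 1
    let dist := PySem.List.pySetD (List.replicate (n+1).toNat (-1)) z 0
    let pinit := PySem.Int.mod z 2
    let a0 := if pinit = 0 then p0 else p1
    let t := dsuFind a0 (z+2) N
    let a2 := PySem.List.pySetD t.2 z t.1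
    aLoop n k N (if pinit = 0 then a2 else p0) (if pinit = 0 then p1 else a2) dist [z] (n+2).toNat

-- ===== PORT B =====
-- inner 'while curr <= r' loop of B: plain scan in steps of 2, dict doubles as visited set
-- (fueled like A's loops; fuel = n+3 always suffices since the scan takes ≤ r/2+1 ≤ n+3 steps)
def bScan (r d : Int) (dist : PySem.Dict Int Int) (q : List Int) (curr : Int) :
    Nat → PySem.Dict Int Int × List Int × Option Int
  | 0 => (dist, q, none)
  | fuel+1 =>
    if curr ≤ r then
      if dist.contains curr then bScan r d dist q (curr + 2) fuel
      else
        let dist' := dist.insert curr (d+1)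
        if curr = 0 then (dist', q, some (d+1))
        else bScan r d dist' (q ++ [curr]) (curr + 2) fuel
    else (dist, q, none)

-- outer BFS loop of B (same fuel shape as A's)
def bLoop (n k : Int) (dist : PySem.Dict Int Int) (q : List Int) : Nat → Int
  | 0 => -1
  | fuel+1 =>
    match q with
    | [] => -1
    | z0 :: q' =>
      let d := dist.getD z0 (-1)   -- Python dist[z0]; the key is always present
      let curr := |z0 - k|
      let r := min (z0 + k) (2 * n - z0 - k)
      match bScan r d dist q' curr (n+3).toNat with
      | (_, _, some v) => v
      | (dist', q'', none) => bLoop n k dist' q'' fuel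

def minOperations_alt (s : String) (k : Int) : Int :=
  let n : Int := PySem.Str.len s
  let z : Int := (PySem.Str.count s "0" : Int)
  if z = 0 then 0
  else bLoop n k (PySem.Dict.ofList [(z, 0)]) [z] (n+2).toNat

-- ===== PRECONDITION & SPEC =====
-- Pre_ excludes exactly the inputs on which A raises IndexError: s contains a '0', k is outside
-- [0, len(s)], and |z_count - k| > len(s) + 2 overruns A's fixed-size DSU arrays.
def Pre_minOperations (s : String) (k : Int) : Prop :=
  (PySem.Str.count s "0" : Int) = 0 ∨ (0 ≤ k ∧ k ≤ PySem.Str.len s) ∨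
    |(PySem.Str.count s "0" : Int) - k| ≤ PySem.Str.len s + 2
instance (s : String) (k : Int) : Decidable (Pre_minOperations s k) := by
  unfold Pre_minOperations; infer_instance
def pvWitness_minOperations : String × Int := ("10", 1)

-- On inputs excluded by Pre_ (a '0' present, k outside [0, len(s)], |z_count - k| > len(s) + 2)
-- A raises IndexError on its DSU arrays, while B's dict-based BFS returns -1.
def Raises_minOperations (s : String) (k : Int) : Prop :=
  (PySem.Str.count s "0" : Int) ≠ 0 ∧ (k < 0 ∨ PySem.Str.len s < k) ∧
    PySem.Str.len s + 2 < |(PySem.Str.count s "0" : Int) - k|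
instance (s : String) (k : Int) : Decidable (Raises_minOperations s k) := by
  unfold Raises_minOperations; infer_instance
def pvRaiseWitness_minOperations : String × Int := ("0", 10)
def pvRaiseWitnessOut_minOperations : Int := -1

def Spec_minOperations (s : String) (k : Int) (out : Int) : Prop := out = minOperations_alt s k
instance (s : String) (k : Int) (out : Int) : Decidable (Spec_minOperations s k out) := by
  unfold Spec_minOperations; infer_instance

-- ===== CLAIM (what is proved, stated in full; the proofs are below) =====
def Claim_equal_minOperations : Prop := ∀ (s : String) (k : Int), Dom_minOperations s k →
  Pre_minOperations s k → Spec_minOperations s k (minOperations s k)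
def Claim_raises_minOperations : Prop :=
  (∀ (s : String) (k : Int), Dom_minOperations s k → Raises_minOperations s k → ¬ Pre_minOperations s k) ∧
  (Dom_minOperations (pvRaiseWitness_minOperations.1) (pvRaiseWitness_minOperations.2) ∧
   Raises_minOperations (pvRaiseWitness_minOperations.1) (pvRaiseWitness_minOperations.2) ∧
   minOperations_alt (pvRaiseWitness_minOperations.1) (pvRaiseWitness_minOperations.2) = pvRaiseWitnessOut_minOperations)

-- ===== LEMMAS AND PROOFS =====

-- j is unmarked in parent array a (an index that is its own parent)
def um (a : List Int) (j : Int) : Prop := PySem.List.pyGetD a j 0 = j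

-- DSU invariant for one parent array of A: marked entries point strictly forward, with the
-- same parity, not past the next unmarked index, and only indices ≤ n are ever marked.
def Good (n : Int) (a : List Int) : Prop :=
  a.length = (n+3).toNat ∧
  ∀ j : Int, 0 ≤ j → j < n + 3 → ¬ um a j →
    j ≤ n ∧ j + 2 ≤ PySem.List.pyGetD a j 0 ∧ PySem.List.pyGetD a j 0 ≤ n + 2 ∧
    (PySem.List.pyGetD a j 0 - j) % 2 = 0 ∧
    ∀ m : Int, j < m → m < PySem.List.pyGetD a j 0 → (m - j) % 2 = 0 → ¬ um a m

-- j is the next unmarked index ≥ i of i's parity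
def IsNu (a : List Int) (i j : Int) : Prop :=
  i ≤ j ∧ (j - i) % 2 = 0 ∧ um a j ∧ ∀ m : Int, i ≤ m → m < j → (m - i) % 2 = 0 → ¬ um a m

def sameUm (a b : List Int) : Prop := ∀ j : Int, 0 ≤ j → (um a j ↔ um b j)

-- point read after point write, nonnegative indices
theorem pyGetD_pySetD (a : List Int) (x v m d : Int) (hx0 : 0 ≤ x) (hx : x < (a.length : Int))
    (hm : 0 ≤ m) :
    PySem.List.pyGetD (PySem.List.pySetD a x v) m d = if m = x then v else PySem.List.pyGetD a m d := by
  have hx' : x = ((x.toNat : Nat) : Int) := by omega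
  rw [hx', PySem.List.pySetD_natCast]
  unfold PySem.List.pyGetD
  rw [PySem.List.pyGet?_of_nonneg _ hm, PySem.List.pyGet?_of_nonneg _ hm,
    List.getElem?_set]
  by_cases hmx : m = ((x.toNat : Nat) : Int)
  · subst hmx
    simp only [Int.toNat_natCast, if_pos rfl, if_pos (by omega : x.toNat < a.length)]
    rfl
  · have : x.toNat ≠ m.toNat := by omega
    rw [if_neg this, if_neg hmx]

theorem pyGetD_fresh (n j : Int) (h0 : 0 ≤ j) (h1 : j < n + 3) :
    PySem.List.pyGetD (PySem.List.pyRange 0 (n+3) 1) j 0 = j := by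
  rw [← List.map_id (PySem.List.pyRange 0 (n+3) 1)]
  have := PySem.List.pyGetD_map_pyRange_of_nonneg (fun x : Int => x) (n+3) j 0 h0 h1
  simpa [id] using this

theorem length_fresh (n : Int) : (PySem.List.pyRange 0 (n+3) 1).length = (n+3).toNat := by
  rw [PySem.List.length_pyRange_one]; omega

theorem pyGetD_replicate (c : Nat) (m d : Int) (hm : 0 ≤ m) :
    PySem.List.pyGetD (List.replicate c d) m d = d := by
  unfold PySem.List.pyGetD
  rw [PySem.List.pyGet?_of_nonneg _ hm, List.getElem?_replicate]
  split <;> rfl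

theorem IsNu_congr {a b : List Int} (h : sameUm a b) {i j : Int} (hi : 0 ≤ i) (hj : IsNu b i j) :
    IsNu a i j := by
  obtain ⟨h1, h2, h3, h4⟩ := hj
  exact ⟨h1, h2, (h (j) (by omega)).2 h3,
    fun m hm1 hm2 hm3 hum => h4 m hm1 hm2 hm3 ((h m (by omega)).1 hum)⟩

theorem nu_exists {n : Int} {a : List Int} (hG : Good n a) {i : Int} (h0 : 0 ≤ i) (h2 : i ≤ n + 2) :
    ∃ j, j ≤ n + 2 ∧ IsNu a i j := by
  suffices h : ∀ meas : Nat, ∀ i : Int, (n + 2 - i).toNat ≤ meas → 0 ≤ i → i ≤ n + 2 →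
      ∃ j, j ≤ n + 2 ∧ IsNu a i j from h (n + 2 - i).toNat i le_rfl h0 h2
  intro meas
  induction meas with
  | zero =>
    intro i hm h0 h2
    have hi : i = n + 2 := by omega
    by_cases hum : um a i
    · exact ⟨i, h2, le_rfl, by omega, hum, fun m h1 h2 _ => (by omega : False).elim⟩
    · exact absurd ((hG.2 i h0 (by omega) hum).1) (by omega)
  | succ meas ih =>
    intro i hm h0 h2
    by_cases hum : um a i
    · exact ⟨i, h2, le_rfl, by omega, hum, fun m h1 h2 _ => (by omega : False).elim⟩
    · have hle := (hG.2 i h0 (by omega) hum).1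
      obtain ⟨j, hj, h1, h2', h3, h4⟩ := ih (i + 2) (by omega) (by omega) (by omega)
      refine ⟨j, hj, by omega, by omega, h3, ?_⟩
      intro m hm1 hm2 hm3
      by_cases hmi : m = i
      · exact hmi ▸ hum
      · exact h4 m (by omega) hm2 (by omega)

theorem findRoot_eq {n : Int} {a : List Int} (hG : Good n a) {i j : Int} (h0 : 0 ≤ i)
    (hj : j ≤ n + 2) (hnu : IsNu a i j) : ∀ fuel : Nat, (j - i).toNat ≤ 2 * fuel → findRoot a fuel i = j := by
  intro fuel
  induction fuel generalizing i with
  | zero =>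
    intro hb
    obtain ⟨h1, h2, h3, h4⟩ := hnu
    have : i = j := by omega
    simp [findRoot, this]
  | succ fuel ih =>
    intro hb
    obtain ⟨h1, h2, h3, h4⟩ := hnu
    by_cases hum : um a i
    · have hij : i = j := by
        by_contra hne
        exact h4 i le_rfl (by omega) (by omega) hum
      subst hij
      rw [findRoot, if_neg (not_not_intro (show PySem.List.pyGetD a i 0 = i from hum))]
    · have hG2 := hG.2 i h0 (by omega) hum
      obtain ⟨hin, hv2, hvn, hvp, hmid⟩ := hG2
      set v := PySem.List.pyGetD a i 0 with hv
      have hvj : v ≤ j := by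
        by_contra hgt
        have hij : i < j := by
          rcases lt_or_eq_of_le h1 with h | h
          · exact h
          · exact absurd (h ▸ h3) hum
        exact hmid j hij (by omega) (by omega) h3
      have hnu' : IsNu a v j := by
        refine ⟨hvj, by omega, h3, ?_⟩
        intro m hm1 hm2 hm3
        exact h4 m (by omega) hm2 (by omega)
      have := ih (i := v) (by omega) hnu' (by omega)
      rw [findRoot, if_pos (by simpa [um] using hum)]
      exact this

theorem compress_spec {n : Int} {a : List Int} {j : Int} (hj : j ≤ n + 2) :
    ∀ (fuel : Nat) (ac : List Int) (curr : Int), Good n ac → sameUm ac a →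
      (∀ m : Int, curr ≤ m → PySem.List.pyGetD ac m 0 = PySem.List.pyGetD a m 0) →
      0 ≤ curr → IsNu a curr j → (j - curr).toNat ≤ 2 * fuel →
      Good n (compress ac j fuel curr) ∧ sameUm (compress ac j fuel curr) a := by
  intro fuel
  induction fuel with
  | zero => intro ac curr hGac hsame _ _ _ _; exact ⟨hGac, hsame⟩
  | succ fuel ih =>
    intro ac curr hGac hsame hahead h0 hnu hb
    obtain ⟨hc1, hc2, hc3, hc4⟩ := hnu
    have hcv : PySem.List.pyGetD ac curr 0 = PySem.List.pyGetD a curr 0 := hahead curr le_rfl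
    rw [compress]
    by_cases hcj : PySem.List.pyGetD ac curr 0 = j
    · rw [if_neg (not_not_intro hcj)]; exact ⟨hGac, hsame⟩
    · rw [if_pos hcj]
      have humc : ¬ um a curr := by
        intro h
        have hcurrj : curr = j := by
          by_contra hne
          exact hc4 curr le_rfl (by omega) (by omega) h
        exact hcj (by rw [hcv]; rw [um] at h; omega)
      have humac : ¬ um ac curr := fun h => humc ((hsame curr h0).1 h)
      have hcjlt : curr < j := by
        rcases lt_or_eq_of_le hc1 with h | h
        · exact h
        · exact absurd (h ▸ hc3) humc
      obtain ⟨hin, hv2, hvn, hvp, hmid⟩ := hGac.2 curr h0 (by omega) humac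
      set v := PySem.List.pyGetD ac curr 0 with hvdef
      have hjcurr2 : curr + 2 ≤ j := by omega
      have hlen : ac.length = (n+3).toNat := hGac.1
      have hgetset : ∀ (m d : Int), 0 ≤ m →
          PySem.List.pyGetD (PySem.List.pySetD ac curr j) m d =
            if m = curr then j else PySem.List.pyGetD ac m d := by
        intro m d hm
        exact pyGetD_pySetD ac curr j m d h0 (by omega) hm
      have humiff : ∀ m : Int, 0 ≤ m →
          (um (PySem.List.pySetD ac curr j) m ↔ um ac m) := by
        intro m hm
        unfold um
        rw [hgetset m 0 hm]
        by_cases hmc : m = curr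
        · subst hmc
          simp only [if_pos rfl]
          constructor
          · intro h; omega
          · intro h; exact absurd h humac
        · rw [if_neg hmc]
      have hGood' : Good n (PySem.List.pySetD ac curr j) := by
        refine ⟨by rw [PySem.List.length_pySetD, hlen], ?_⟩
        intro j' h0' h1' hum'
        have hum'' : ¬ um ac j' := fun h => hum' ((humiff j' h0').2 h)
        by_cases hjc : j' = curr
        · subst hjc
          rw [hgetset j' 0 h0', if_pos rfl]
          refine ⟨hin, hjcurr2, hj, by omega, ?_⟩
          intro m hm1 hm2 hm3
          intro humm
          exact hc4 m (by omega) hm2 (by omega)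
            ((hsame m (by omega)).1 ((humiff m (by omega)).1 humm))
        · rw [hgetset j' 0 h0', if_neg hjc]
          obtain ⟨q1, q2, q3, q4, q5⟩ := hGac.2 j' h0' h1' hum''
          refine ⟨q1, q2, q3, q4, ?_⟩
          intro m hm1 hm2 hm3 humm
          exact q5 m hm1 hm2 hm3 ((humiff m (by omega)).1 humm)
      have hsame' : sameUm (PySem.List.pySetD ac curr j) a :=
        fun m hm => (humiff m hm).trans (hsame m hm)
      have hahead' : ∀ m : Int, v ≤ m →
          PySem.List.pyGetD (PySem.List.pySetD ac curr j) m 0 = PySem.List.pyGetD a m 0 := by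
        intro m hmv
        rw [hgetset m 0 (by omega), if_neg (by omega)]
        exact hahead m (by omega)
      have hvj : v ≤ j := by
        by_contra hgt
        exact hmid j hcjlt (by omega) (by omega) ((hsame j (by omega)).2 hc3)
      have hnu' : IsNu a v j := by
        refine ⟨hvj, by omega, hc3, ?_⟩
        intro m hm1 hm2 hm3
        exact hc4 m (by omega) hm2 (by omega)
      exact ih (PySem.List.pySetD ac curr j) v hGood' hsame' hahead' (by omega) hnu' (by omega)

theorem dsuFind_spec {n : Int} {a : List Int} (hG : Good n a) {i j : Int} (h0 : 0 ≤ i)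
    (hnu : IsNu a i j) (hj : j ≤ n + 2) (hi2 : i ≤ n + 2) :
    dsuFind a i (n+3).toNat = (j, compress a j (n+3).toNat i) ∧
      Good n (compress a j (n+3).toNat i) ∧ sameUm (compress a j (n+3).toNat i) a := by
  have hroot : findRoot a (n+3).toNat i = j :=
    findRoot_eq hG h0 hj hnu (n+3).toNat (by omega)
  have hc := compress_spec hj (n+3).toNat a i hG (fun _ _ => Iff.rfl)
    (fun _ _ => rfl) h0 hnu (by omega)
  exact ⟨by simp [dsuFind, hroot], hc.1, hc.2⟩

-- marking an unmarked index x ≤ n with the value find(x+2) preserves Good and marks exactly x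
theorem mark_spec {n : Int} {a : List Int} (hG : Good n a) {x : Int} (h0 : 0 ≤ x) (hx : x ≤ n)
    (hum : um a x) :
    Good n (PySem.List.pySetD (dsuFind a (x+2) (n+3).toNat).2 x (dsuFind a (x+2) (n+3).toNat).1) ∧
    ∀ m : Int, 0 ≤ m →
      (um (PySem.List.pySetD (dsuFind a (x+2) (n+3).toNat).2 x (dsuFind a (x+2) (n+3).toNat).1) m ↔
        (um a m ∧ m ≠ x)) := by
  obtain ⟨j, hjn, hnu⟩ := nu_exists hG (i := x+2) (by omega) (by omega)
  obtain ⟨hfeq, hGc, hsamec⟩ := dsuFind_spec hG (by omega) hnu hjn (by omega)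
  rw [hfeq]
  obtain ⟨hn1, hn2, hn3, hn4⟩ := hnu
  set c := compress a j (n+3).toNat (x+2) with hcdef
  have hlenc : c.length = (n+3).toNat := hGc.1
  have hgetset : ∀ (m d : Int), 0 ≤ m →
      PySem.List.pyGetD (PySem.List.pySetD c x j) m d =
        if m = x then j else PySem.List.pyGetD c m d := by
    intro m d hm
    exact pyGetD_pySetD c x j m d h0 (by omega) hm
  have humx : um a x := hum
  have hjx : x + 2 ≤ j := hn1
  have humiff : ∀ m : Int, 0 ≤ m →
      (um (PySem.List.pySetD c x j) m ↔ (um c m ∧ m ≠ x)) := by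
    intro m hm
    unfold um
    rw [hgetset m 0 hm]
    by_cases hmx : m = x
    · rw [if_pos hmx]
      constructor
      · intro h; exact absurd h (by omega)
      · rintro ⟨_, h2⟩; exact absurd hmx h2
    · rw [if_neg hmx]; simp [hmx]
  constructor
  · refine ⟨by rw [PySem.List.length_pySetD, hlenc], ?_⟩
    intro j' h0' h1' hum'
    by_cases hjc : j' = x
    · subst hjc
      rw [hgetset j' 0 h0', if_pos rfl]
      refine ⟨hx, hjx, hjn, by omega, ?_⟩
      intro m hm1 hm2 hm3 humm
      have humcm := ((humiff m (by omega)).1 humm).1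
      exact hn4 m (by omega) hm2 (by omega) ((hsamec m (by omega)).1 humcm)
    · have humc' : ¬ um c j' := by
        intro h
        exact hum' ((humiff j' h0').2 ⟨h, hjc⟩)
      rw [hgetset j' 0 h0', if_neg hjc]
      obtain ⟨q1, q2, q3, q4, q5⟩ := hGc.2 j' h0' h1' humc'
      refine ⟨q1, q2, q3, q4, ?_⟩
      intro m hm1 hm2 hm3 humm
      have hmm := (humiff m (by omega)).1 humm
      exact q5 m hm1 hm2 hm3 hmm.1
  · intro m hm
    rw [humiff m hm]
    constructor
    · rintro ⟨h1, h2⟩; exact ⟨(hsamec m hm).1 h1, h2⟩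
    · rintro ⟨h1, h2⟩; exact ⟨(hsamec m hm).2 h1, h2⟩

-- dist/visited relation between A's list and B's dict
def Rinv (n : Int) (dA : List Int) (dB : PySem.Dict Int Int) : Prop :=
  ∀ m : Int, 0 ≤ m → m ≤ n →
    (dB.contains m = true ∧ dB.getD m (-1) = PySem.List.pyGetD dA m (-1) ∧
      PySem.List.pyGetD dA m (-1) ≠ -1) ∨
    (dB.contains m = false ∧ PySem.List.pyGetD dA m (-1) = -1)

def Qinv (n : Int) (dA : List Int) (q : List Int) : Prop :=
  ∀ x ∈ q, 0 ≤ x ∧ x ≤ n ∧ PySem.List.pyGetD dA x (-1) ≠ -1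

-- every marked index is visited
def MV (n : Int) (a dA : List Int) : Prop :=
  ∀ m : Int, 0 ≤ m → m < n + 3 → ¬ um a m → PySem.List.pyGetD dA m (-1) ≠ -1

theorem MV_congr {n : Int} {a b dA : List Int} (h : sameUm a b) (hmv : MV n b dA) : MV n a dA := by
  intro m h0 h1 hum
  exact hmv m h0 h1 (fun humb => hum ((h m h0).2 humb))

-- all stored distances are nonnegative
def DNN (dA : List Int) : Prop :=
  ∀ m : Int, 0 ≤ m → PySem.List.pyGetD dA m (-1) = -1 ∨ 0 ≤ PySem.List.pyGetD dA m (-1)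

theorem aScan_stop (N : Nat) (r d : Int) (a dA q : List Int) (y : Int) (fuelA : Nat)
    (h : ¬ y ≤ r) : aScan N r d a dA q y fuelA = (a, dA, q, none) := by
  cases fuelA with
  | zero => rfl
  | succ f => rw [aScan, if_neg h]

theorem bScan_stop (r d : Int) (dB : PySem.Dict Int Int) (q : List Int) (x : Int) (fuelB : Nat)
    (h : ¬ x ≤ r) : bScan r d dB q x fuelB = (dB, q, none) := by
  cases fuelB with
  | zero => rfl
  | succ f => rw [bScan, if_neg h]

theorem Rinv_insert {n : Int} {dA : List Int} {dB : PySem.Dict Int Int} (hR : Rinv n dA dB)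
    (y v : Int) (h0 : 0 ≤ y) (hyn : y ≤ n) (hv : 0 ≤ v) (hlen : dA.length = (n+1).toNat) :
    Rinv n (PySem.List.pySetD dA y v) (dB.insert y v) := by
  intro m hm0 hmn
  have hget := pyGetD_pySetD dA y v m (-1) h0 (by omega) hm0
  by_cases hmy : m = y
  · subst hmy
    left
    rw [hget, if_pos rfl, PySem.Dict.contains_insert, PySem.Dict.getD_insert]
    refine ⟨by simp, by rw [if_pos rfl], by omega⟩
  · rw [hget, if_neg hmy, PySem.Dict.contains_insert, PySem.Dict.getD_insert,
      if_neg hmy]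
    have : (m == y) = false := by simpa using hmy
    rw [this, Bool.false_or]
    exact hR m hm0 hmn

-- A's mark-and-advance step: after processing unmarked y ≤ n, A lands on the next unmarked y'
theorem stepA {n : Int} {a : List Int} (hG : Good n a) {y : Int} (h0 : 0 ≤ y) (hyn : y ≤ n)
    (hum : um a y) :
    ∃ y' a3,
      dsuFind (PySem.List.pySetD (dsuFind a (y+2) (n+3).toNat).2 y
        (dsuFind a (y+2) (n+3).toNat).1) y (n+3).toNat = (y', a3) ∧
      y + 2 ≤ y' ∧ y' ≤ n + 2 ∧ Good n a3 ∧ IsNu a3 (y+2) y' ∧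
      (∀ m : Int, 0 ≤ m → (um a3 m ↔ (um a m ∧ m ≠ y))) := by
  obtain ⟨hG2, humiff2⟩ := mark_spec hG h0 hyn hum
  set a2 := PySem.List.pySetD (dsuFind a (y+2) (n+3).toNat).2 y
    (dsuFind a (y+2) (n+3).toNat).1 with ha2
  obtain ⟨y', hy'n, hnu2⟩ := nu_exists hG2 (i := y) h0 (by omega)
  have hnoty : ¬ um a2 y := by
    intro h
    exact ((humiff2 y h0).1 h).2 rfl
  have hy'2 : y + 2 ≤ y' := by
    obtain ⟨e1, e2, e3, _⟩ := hnu2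
    have : y' ≠ y := fun h => hnoty (h ▸ e3)
    omega
  obtain ⟨hfeq, hG3, hsame3⟩ := dsuFind_spec hG2 h0 hnu2 hy'n (by omega)
  refine ⟨y', _, hfeq, hy'2, hy'n, hG3, ?_, ?_⟩
  · refine IsNu_congr hsame3 (by omega) ?_
    obtain ⟨e1, e2, e3, e4⟩ := hnu2
    exact ⟨by omega, by omega, e3, fun m h1 h2 h3 => e4 m (by omega) h2 (by omega)⟩
  · intro m hm
    exact ((hsame3 m hm).trans (humiff2 m hm))

-- the inner-loop simulation: A's DSU-skipping scan from nu(x) equals B's step-2 scan from x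
theorem innerEq {n d r : Int} (hr : r ≤ n) (hd : 0 ≤ d) :
    ∀ (fuelB : Nat) (x y : Int) (a dA : List Int) (dB : PySem.Dict Int Int) (q : List Int)
      (fuelA : Nat),
      (r + 2 - x).toNat ≤ 2 * fuelB → 0 ≤ x →
      Good n a → MV n a dA → Rinv n dA dB → Qinv n dA q → dA.length = (n+1).toNat → DNN dA →
      IsNu a x y → (r + 4 - y).toNat ≤ 2 * fuelA →
      (aScan (n+3).toNat r d a dA q y fuelA).2.2.2 = (bScan r d dB q x fuelB).2.2 ∧
      (aScan (n+3).toNat r d a dA q y fuelA).2.2.1 = (bScan r d dB q x fuelB).2.1 ∧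
      Rinv n (aScan (n+3).toNat r d a dA q y fuelA).2.1 (bScan r d dB q x fuelB).1 ∧
      ((aScan (n+3).toNat r d a dA q y fuelA).2.2.2 = none →
        Good n (aScan (n+3).toNat r d a dA q y fuelA).1 ∧
        MV n (aScan (n+3).toNat r d a dA q y fuelA).1 (aScan (n+3).toNat r d a dA q y fuelA).2.1 ∧
        Qinv n (aScan (n+3).toNat r d a dA q y fuelA).2.1 (aScan (n+3).toNat r d a dA q y fuelA).2.2.1 ∧
        (aScan (n+3).toNat r d a dA q y fuelA).2.1.length = (n+1).toNat ∧
        DNN (aScan (n+3).toNat r d a dA q y fuelA).2.1 ∧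
        (∀ m : Int, 0 ≤ m → PySem.List.pyGetD dA m (-1) ≠ -1 →
          PySem.List.pyGetD (aScan (n+3).toNat r d a dA q y fuelA).2.1 m (-1) ≠ -1)) := by
  intro fuelB
  induction fuelB with
  | zero =>
    intro x y a dA dB q fuelA hbB h0x hG hMV hR hQ hlen hDNN hnu hbA
    have hxr : ¬ x ≤ r := by omega
    have hyr : ¬ y ≤ r := by have := hnu.1; omega
    rw [aScan_stop _ _ _ _ _ _ _ _ hyr, bScan_stop _ _ _ _ _ _ hxr]
    exact ⟨rfl, rfl, hR, fun _ => ⟨hG, hMV, hQ, hlen, hDNN, fun m _ h => h⟩⟩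
  | succ fB ih =>
    intro x y a dA dB q fuelA hbB h0x hG hMV hR hQ hlen hDNN hnu hbA
    by_cases hxr : x ≤ r
    · have hx_n : x ≤ n := le_trans hxr hr
      rcases lt_or_eq_of_le hnu.1 with hlt | heq
      · -- x < y : x is marked hence visited; B skips it, A does not move
        have humax : ¬ um a x := hnu.2.2.2 x le_rfl hlt (by omega)
        have hvx : PySem.List.pyGetD dA x (-1) ≠ -1 := hMV x h0x (by omega) humax
        have hcx : dB.contains x = true := by
          rcases hR x h0x hx_n with ⟨hc, _, _⟩ | ⟨_, hveq⟩
          · exact hc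
          · exact absurd hveq hvx
        rw [bScan, if_pos hxr, if_pos hcx]
        have hnu' : IsNu a (x+2) y := by
          obtain ⟨e1, e2, e3, e4⟩ := hnu
          exact ⟨by omega, by omega, e3, fun m h1 h2 h3 => e4 m (by omega) h2 (by omega)⟩
        exact ih (x+2) y a dA dB q fuelA (by omega) (by omega) hG hMV hR hQ hlen hDNN hnu' hbA
      · -- x = y : both examine y
        subst heq
        cases fuelA with
        | zero => exact absurd hbA (by omega)
        | succ fA =>
        have humy : um a x := hnu.2.2.1
        rcases hR x h0x hx_n with ⟨hcx, hgeq, hne⟩ | ⟨hcx, hveq⟩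
        · -- already visited: B skips, A marks and advances
          obtain ⟨y', a3, hfeq, hy'2, hy'n, hG3, hnu3, humiff3⟩ := stepA hG h0x hx_n humy
          have hAstep : aScan (n+3).toNat r d a dA q x (fA+1) =
              aScan (n+3).toNat r d a3 dA q y' fA := by
            rw [aScan, if_pos hxr, if_neg hne]
            simp only [hfeq]
          have hBstep : bScan r d dB q x (fB+1) = bScan r d dB q (x+2) fB := by
            rw [bScan, if_pos hxr, if_pos hcx]
          rw [hAstep, hBstep]
          have hMV3 : MV n a3 dA := by
            intro m hm0 hm1 hum3
            by_cases hmy : m = x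
            · exact hmy ▸ hne
            · exact hMV m hm0 hm1 (fun h => hum3 ((humiff3 m hm0).2 ⟨h, hmy⟩))
          exact ih (x+2) y' a3 dA dB q fA (by omega) (by omega) hG3 hMV3 hR hQ hlen hDNN
            hnu3 (by omega)
        · -- unvisited: both record distance d+1
          by_cases hy0 : x = 0
          · have hAstep : aScan (n+3).toNat r d a dA q x (fA+1) =
                (a, PySem.List.pySetD dA x (d+1), q, some (d+1)) := by
              rw [aScan, if_pos hxr, if_pos hveq, if_pos hy0]
            have hBstep : bScan r d dB q x (fB+1) =
                (dB.insert x (d+1), q, some (d+1)) := by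
              rw [bScan, if_pos hxr]
              simp only [hcx, Bool.false_eq_true, if_false]
              rw [if_pos hy0]
            rw [hAstep, hBstep]
            exact ⟨rfl, rfl, Rinv_insert hR x (d+1) h0x hx_n (by omega) hlen,
              fun h => absurd h (by simp)⟩
          · obtain ⟨y', a3, hfeq, hy'2, hy'n, hG3, hnu3, humiff3⟩ := stepA hG h0x hx_n humy
            set dA' := PySem.List.pySetD dA x (d+1) with hdA'
            have hAstep : aScan (n+3).toNat r d a dA q x (fA+1) =
                aScan (n+3).toNat r d a3 dA' (q ++ [x]) y' fA := by
              rw [aScan, if_pos hxr, if_pos hveq, if_neg hy0]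
              simp only [hfeq]
              rw [hdA']
            have hBstep : bScan r d dB q x (fB+1) =
                bScan r d (dB.insert x (d+1)) (q ++ [x]) (x+2) fB := by
              rw [bScan, if_pos hxr]
              simp only [hcx, Bool.false_eq_true, if_false]
              rw [if_neg hy0]
            rw [hAstep, hBstep]
            have hget' : ∀ (m e : Int), 0 ≤ m →
                PySem.List.pyGetD dA' m e = if m = x then d+1 else PySem.List.pyGetD dA m e :=
              fun m e hm => pyGetD_pySetD dA x (d+1) m e h0x (by omega) hm
            have hMV3 : MV n a3 dA' := by
              intro m hm0 hm1 hum3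
              rw [hget' m (-1) hm0]
              by_cases hmy : m = x
              · rw [if_pos hmy]; omega
              · rw [if_neg hmy]
                exact hMV m hm0 hm1 (fun h => hum3 ((humiff3 m hm0).2 ⟨h, hmy⟩))
            have hR' : Rinv n dA' (dB.insert x (d+1)) :=
              Rinv_insert hR x (d+1) h0x hx_n (by omega) hlen
            have hQ' : Qinv n dA' (q ++ [x]) := by
              intro w hw
              rcases List.mem_append.1 hw with hw | hw
              · obtain ⟨w1, w2, w3⟩ := hQ w hw
                refine ⟨w1, w2, ?_⟩
                rw [hget' w (-1) w1]
                by_cases hwy : w = x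
                · rw [if_pos hwy]; omega
                · rw [if_neg hwy]; exact w3
              · have : w = x := by simpa using hw
                subst this
                exact ⟨h0x, hx_n, by rw [hget' w (-1) h0x, if_pos rfl]; omega⟩
            have hDNN' : DNN dA' := by
              intro m hm0
              rw [hget' m (-1) hm0]
              by_cases hmy : m = x
              · rw [if_pos hmy]; omega
              · rw [if_neg hmy]; exact hDNN m hm0
            have hlen' : dA'.length = (n+1).toNat := by
              rw [hdA', PySem.List.length_pySetD, hlen]
            have := ih (x+2) y' a3 dA' (dB.insert x (d+1)) (q ++ [x]) fA (by omega)
              (by omega) hG3 hMV3 hR' hQ' hlen' hDNN' hnu3 (by omega)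
            refine ⟨this.1, this.2.1, this.2.2.1, ?_⟩
            intro hnone
            obtain ⟨c1, c2, c3, c4, c5, c6⟩ := this.2.2.2 hnone
            refine ⟨c1, c2, c3, c4, c5, ?_⟩
            intro m hm0 hmne
            refine c6 m hm0 ?_
            rw [hget' m (-1) hm0]
            by_cases hmy : m = x
            · rw [if_pos hmy]; omega
            · rw [if_neg hmy]; exact hmne
    · have hyr : ¬ y ≤ r := by have := hnu.1; omega
      rw [aScan_stop _ _ _ _ _ _ _ _ hyr, bScan_stop _ _ _ _ _ _ hxr]
      exact ⟨rfl, rfl, hR, fun _ => ⟨hG, hMV, hQ, hlen, hDNN, fun m _ h => h⟩⟩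

-- the outer-loop simulation
theorem outerEq {n k : Int} (hk0 : 0 ≤ k) (hkn : k ≤ n) :
    ∀ (fuel : Nat) (p0 p1 dA : List Int) (dB : PySem.Dict Int Int) (q : List Int),
      Good n p0 → Good n p1 → MV n p0 dA → MV n p1 dA → Rinv n dA dB → Qinv n dA q →
      dA.length = (n+1).toNat → DNN dA →
      aLoop n k (n+3).toNat p0 p1 dA q fuel = bLoop n k dB q fuel := by
  intro fuel
  induction fuel with
  | zero => intros; rfl
  | succ fuel ih =>
    intro p0 p1 dA dB q hG0 hG1 hMV0 hMV1 hR hQ hlen hDNN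
    cases q with
    | nil => rfl
    | cons z q' =>
      have hn0 : 0 ≤ n := by omega
      obtain ⟨hz0, hzn, hzv⟩ := hQ z (by simp)
      have hQ' : Qinv n dA q' := fun w hw => hQ w (by simp [hw])
      have hgz : dB.getD z (-1) = PySem.List.pyGetD dA z (-1) := by
        rcases hR z hz0 hzn with ⟨_, h, _⟩ | ⟨_, hveq⟩
        · exact h
        · exact absurd hveq hzv
      have hd0 : 0 ≤ PySem.List.pyGetD dA z (-1) := by
        rcases hDNN z hz0 with h | h
        · exact absurd h hzv
        · exact h
      set d := PySem.List.pyGetD dA z (-1) with hddef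
      set l := |z - k| with hldef
      have hl0 : 0 ≤ l := abs_nonneg _
      have hln : l ≤ n := by
        rcases abs_cases (z - k) with ⟨h, _⟩ | ⟨h, _⟩ <;> omega
      set r := min (z + k) (2 * n - z - k) with hrdef
      have hrn : r ≤ n := by
        rcases min_cases (z + k) (2 * n - z - k) with ⟨h, _⟩ | ⟨h, _⟩ <;> omega
      set par := PySem.Int.mod (z + k) 2 with hpardef
      set a := if par = 0 then p0 else p1 with hadef
      have hGa : Good n a := by rw [hadef]; split <;> assumption
      have hMVa : MV n a dA := by rw [hadef]; split <;> assumption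
      obtain ⟨y0, hy0n, hnu0⟩ := nu_exists hGa (i := l) hl0 (by omega)
      obtain ⟨hfeq, hG1', hsame1⟩ := dsuFind_spec hGa hl0 hnu0 hy0n (by omega)
      set a1 := compress a y0 (n+3).toNat l with ha1
      have hy00 : l ≤ y0 := hnu0.1
      have hnu1 : IsNu a1 l y0 := IsNu_congr hsame1 hl0 hnu0
      have hMV1' : MV n a1 dA := MV_congr hsame1 hMVa
      have hmain := innerEq hrn hd0 (n+3).toNat l y0 a1 dA dB q' (n+3).toNat
        (by omega) hl0 hG1' hMV1' hR hQ' hlen hDNN hnu1 (by omega)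
      rcases hA : aScan (n+3).toNat r d a1 dA q' y0 (n+3).toNat with ⟨a', dA', q'', oA⟩
      rcases hB : bScan r d dB q' l (n+3).toNat with ⟨dB', qB', oB⟩
      rw [hA, hB] at hmain
      dsimp only at hmain
      obtain ⟨ho, hq, hRi, hrest⟩ := hmain
      rw [aLoop, bLoop]
      rw [hgz, hfeq]
      rw [hA, hB]
      cases oA with
      | some v =>
        rw [← ho]
      | none =>
        rw [← ho]
        obtain ⟨hGa', hMVa', hQ'', hlen', hDNN', hmono⟩ := hrest rfl
        subst hq
        refine ih (if par = 0 then a' else p0) (if par = 0 then p1 else a') dA' dB' q''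
          ?_ ?_ ?_ ?_ hRi hQ'' hlen' hDNN'
        · split <;> assumption
        · split <;> assumption
        · split
          · exact hMVa'
          · intro m hm0 hm1 hum
            exact hmono m hm0 (hMV0 m hm0 hm1 hum)
        · split
          · intro m hm0 hm1 hum
            exact hmono m hm0 (hMV1 m hm0 hm1 hum)
          · exact hMVa' 

theorem countgo_le (sub : List Char) (hs : 1 ≤ sub.length) :
    ∀ (fuel : Nat) (l : List Char) (acc : Nat),
      PySem.Chars.count.go sub fuel l acc ≤ acc + l.length := by
  intro fuel
  induction fuel with
  | zero => intro l acc; rw [PySem.Chars.count.go]; cases l <;> simp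
  | succ f ih =>
    intro l acc
    cases l with
    | nil =>
      rw [PySem.Chars.count.go]
      simp
      omega
    | cons h t =>
      rw [PySem.Chars.count.go]
      split
      · calc PySem.Chars.count.go sub f (List.drop sub.length (h :: t)) (acc + 1)
            ≤ (acc + 1) + (List.drop sub.length (h :: t)).length := ih _ _
          _ ≤ acc + (h :: t).length := by simp [List.length_drop]; omega
      · calc PySem.Chars.count.go sub f t acc ≤ acc + t.length := ih _ _
          _ ≤ acc + (h :: t).length := by simp
theorem count_le_len (s : String) : (PySem.Str.count s "0" : Int) ≤ PySem.Str.len s := by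
  rw [PySem.Str.count_eq, PySem.Str.len_eq]
  have h0 : ("0" : String).toList = ['0'] := by decide
  rw [h0, PySem.Chars.count]
  simp only [List.isEmpty_cons, if_false, Bool.false_eq_true]
  have := countgo_le ['0'] (by simp) s.toList.length s.toList 0
  omega
theorem aLoop_nil (n k : Int) (N : Nat) (p0 p1 dist : List Int) (fuel : Nat) :
    aLoop n k N p0 p1 dist [] fuel = -1 := by cases fuel <;> rfl
theorem bLoop_nil (n k : Int) (dB : PySem.Dict Int Int) (fuel : Nat) :
    bLoop n k dB [] fuel = -1 := by cases fuel <;> rfl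

-- ===== VERDICT (by name: the statement is the Claim_ definition above) =====
theorem minOperations_spec : Claim_equal_minOperations := by
  unfold Claim_equal_minOperations Spec_minOperations
  intro s k _ hpre
  unfold minOperations minOperations_alt
  unfold Pre_minOperations at hpre
  set n := PySem.Str.len s with hndef
  set z := ((PySem.Str.count s "0" : Nat) : Int) with hzdef
  have hn0 : 0 ≤ n := by
    have := PySem.Str.len_eq s
    omega
  have hz0 : 0 ≤ z := Int.natCast_nonneg _
  have hzn : z ≤ n := count_le_len s
  by_cases hz : z = 0
  · rw [if_pos hz, if_pos hz]
  · rw [if_neg hz, if_neg hz]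
    simp only [ite_self]
    have hz1 : 1 ≤ z := by omega
    set fresh := PySem.List.pyRange 0 (n+3) 1 with hfr
    have hGfresh : Good n fresh := by
      refine ⟨length_fresh n, ?_⟩
      intro j h0 h1 hum
      exact absurd (pyGetD_fresh n j h0 h1) hum
    have humfz : um fresh z := pyGetD_fresh n z hz0 (by omega)
    obtain ⟨hGm, humm⟩ := mark_spec hGfresh hz0 hzn humfz
    set a2 := PySem.List.pySetD (dsuFind fresh (z+2) (n+3).toNat).2 z
      (dsuFind fresh (z+2) (n+3).toNat).1 with ha2
    set dist0 := PySem.List.pySetD (List.replicate (n+1).toNat (-1)) z 0 with hdist0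
    have hgd : ∀ m : Int, 0 ≤ m →
        PySem.List.pyGetD dist0 m (-1) = if m = z then 0 else -1 := by
      intro m hm
      rw [hdist0, pyGetD_pySetD _ _ _ _ _ hz0 (by rw [List.length_replicate]; omega) hm]
      by_cases hmz : m = z
      · rw [if_pos hmz, if_pos hmz]
      · rw [if_neg hmz, if_neg hmz, pyGetD_replicate _ _ _ hm]
    have hlen0 : dist0.length = (n+1).toNat := by
      rw [hdist0, PySem.List.length_pySetD, List.length_replicate]
    have hRbase : Rinv n (List.replicate (n+1).toNat (-1)) PySem.Dict.empty := by
      intro m hm0 hmn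
      right
      exact ⟨PySem.Dict.contains_empty m, pyGetD_replicate _ _ _ hm0⟩
    have hR0 : Rinv n dist0 (PySem.Dict.ofList [(z, (0:Int))]) := by
      rw [show PySem.Dict.ofList [(z, (0:Int))] = PySem.Dict.empty.insert z 0 from rfl]
      exact Rinv_insert hRbase z 0 hz0 hzn le_rfl (by rw [List.length_replicate])
    have hMV2 : MV n a2 dist0 := by
      intro m hm0 hm1 hum
      have : m = z := by
        by_contra hne
        exact hum ((humm m hm0).2 ⟨pyGetD_fresh n m hm0 hm1, hne⟩)
      rw [hgd m hm0, if_pos this]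
      omega
    have hMVf : MV n fresh dist0 := by
      intro m hm0 hm1 hum
      exact absurd (pyGetD_fresh n m hm0 hm1) hum
    have hQ0 : Qinv n dist0 [z] := by
      intro x hx
      have : x = z := by simpa using hx
      subst this
      exact ⟨hz0, hzn, by rw [hgd z hz0, if_pos rfl]; omega⟩
    have hDNN0 : DNN dist0 := by
      intro m hm0
      rw [hgd m hm0]
      by_cases hmz : m = z
      · rw [if_pos hmz]; omega
      · rw [if_neg hmz]; omega
    by_cases hk : 0 ≤ k ∧ k ≤ n
    · exact outerEq hk.1 hk.2 (n+2).toNat _ _ dist0 _ [z]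
        (by split <;> assumption) (by split <;> assumption)
        (by split
            · exact hMV2
            · exact hMVf)
        (by split
            · exact hMVf
            · exact hMV2)
        hR0 hQ0 hlen0 hDNN0
    · -- k outside [0, n]: the scanned interval is empty, one pop, both return -1
      have hlk : |z - k| ≤ n + 2 := by
        rcases hpre with h | h | h
        · exact absurd h hz
        · exact absurd h hk
        · exact h
      have hlr : min (z + k) (2 * n - z - k) < |z - k| := by
        rcases abs_cases (z - k) with ⟨h1, h2⟩ | ⟨h1, h2⟩ <;>
          rcases min_cases (z + k) (2 * n - z - k) with ⟨h3, h4⟩ | ⟨h3, h4⟩ <;> omega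
      rw [show (n+2).toNat = (n+1).toNat + 1 by omega]
      rw [aLoop, bLoop]
      set P0 := if PySem.Int.mod z 2 = 0 then a2 else fresh with hP0
      set P1 := if PySem.Int.mod z 2 = 0 then fresh else a2 with hP1
      set A := if PySem.Int.mod (z + k) 2 = 0 then P0 else P1 with hA
      have hGA : Good n A := by
        rw [hA]
        split
        · rw [hP0]; split <;> assumption
        · rw [hP1]; split <;> assumption
      obtain ⟨y0, hy0n, hnu0⟩ := nu_exists hGA (i := |z - k|) (abs_nonneg _) hlk
      obtain ⟨hfeq, _, _⟩ := dsuFind_spec hGA (abs_nonneg _) hnu0 hy0n hlk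
      rw [hgd z hz0, if_pos rfl, hfeq,
        aScan_stop _ _ _ _ _ _ _ _ (by have := hnu0.1; omega),
        bScan_stop _ _ _ _ _ _ (by omega)]
      exact (aLoop_nil _ _ _ _ _ _ _).trans (bLoop_nil _ _ _ _).symm

@[simp]
theorem minOperations_raises : Claim_raises_minOperations := by
  unfold Claim_raises_minOperations
  constructor
  · intro s k _ hr hp
    unfold Raises_minOperations at hr
    unfold Pre_minOperations at hp
    omega
  · refine ⟨by decide, by decide, by decide⟩
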